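-- pv_equiv track=rewrite | github.com/WingingAxis44/MLECG_MI | src/data.py | setClass
-- ===== SOURCE A (Python) =====
-- def setClass(segmentLabels):
--
--     isOther = False
--     for labelPair in segmentLabels:
--
--         rhythm = labelPair[0]
--         rhythmClass = getRhythmClass(rhythm)
--
--         if(rhythmClass == 1):
--             return 1
--         elif(rhythmClass == 2):
--             isOther = True
--
--     if(isOther):
--         return 2
--     else:
--         return 0
--
-- def getRhythmClass(aux_note):
--
--
--     #Normal
--     if ( ('(N' in aux_note) and ('(NOD' not in aux_note)):
--
--         return 0
--
--     #Afib
--     elif ('(AFIB' in aux_note):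
--
--         return 1
--
--         #Other
--     else:
--
--         return 2
-- ===== SOURCE B (Python) =====
-- def isNormalNote(note):
--     return '(N' in note and '(NOD' not in note
--
-- def isAfibNote(note):
--     return not isNormalNote(note) and '(AFIB' in note
--
-- def isOtherNote(note):
--     return not isNormalNote(note) and '(AFIB' not in note
--
-- def setClass(segmentLabels):
--     # B: staged whole-list queries over boolean predicates, no per-item
--     # numeric classifier and no carried flag: first ask "is any label AFIB?",
--     # then "is any label an other rhythm?".
--     notes = [labelPair[0] for labelPair in segmentLabels]
--     if any(isAfibNote(n) for n in notes):
--         return 1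
--     if any(isOtherNote(n) for n in notes):
--         return 2
--     return 0
-- ===== Notes on version B (the rewrite author's own statement) =====
-- stated objective: alternative
-- what changed: B drops A's numeric per-item classifier and flag-carrying early-return scan in favour of two staged any() queries over direct boolean predicates (isAfibNote, isOtherNote) on the extracted rhythm notes.
import Mathlib
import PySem

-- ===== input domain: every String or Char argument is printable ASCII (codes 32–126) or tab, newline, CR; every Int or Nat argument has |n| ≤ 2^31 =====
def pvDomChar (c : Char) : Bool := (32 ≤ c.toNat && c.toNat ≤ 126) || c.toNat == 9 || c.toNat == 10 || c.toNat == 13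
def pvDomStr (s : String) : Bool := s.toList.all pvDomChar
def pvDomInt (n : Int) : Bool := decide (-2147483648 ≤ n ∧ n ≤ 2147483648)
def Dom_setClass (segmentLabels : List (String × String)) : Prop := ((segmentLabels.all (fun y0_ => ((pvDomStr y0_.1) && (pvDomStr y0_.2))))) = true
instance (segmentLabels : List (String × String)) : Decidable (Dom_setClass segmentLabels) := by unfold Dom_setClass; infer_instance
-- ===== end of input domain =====

-- B replaces A's flag-carrying early-return scan with a numeric per-item classifier
-- by two staged any-queries over direct boolean predicates (return value only).
-- ===== PORT A =====
def getRhythmClass (aux_note : String) : Int :=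
  if PySem.Str.isIn "(N" aux_note && !(PySem.Str.isIn "(NOD" aux_note) then 0
  else if PySem.Str.isIn "(AFIB" aux_note then 1
  else 2

def setClassLoop : List (String × String) → Bool → Int
  | [], isOther => if isOther then 2 else 0
  | labelPair :: rest, isOther =>
    let rhythmClass := getRhythmClass labelPair.1
    if rhythmClass = 1 then 1
    else setClassLoop rest (isOther || rhythmClass == 2)

def setClass (segmentLabels : List (String × String)) : Int :=
  setClassLoop segmentLabels false

-- ===== PORT B =====
def isNormalNote (note : String) : Bool :=
  PySem.Str.isIn "(N" note && !(PySem.Str.isIn "(NOD" note)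

def isAfibNote (note : String) : Bool :=
  !isNormalNote note && PySem.Str.isIn "(AFIB" note

def isOtherNote (note : String) : Bool :=
  !isNormalNote note && !(PySem.Str.isIn "(AFIB" note)

def setClass_alt (segmentLabels : List (String × String)) : Int :=
  let notes := segmentLabels.map (fun labelPair => labelPair.1)
  if notes.any isAfibNote then 1
  else if notes.any isOtherNote then 2
  else 0

-- ===== PRECONDITION & SPEC =====
def Spec_setClass (segmentLabels : List (String × String)) (out : Int) : Prop := out = setClass_alt segmentLabels
instance (segmentLabels : List (String × String)) (out : Int) : Decidable (Spec_setClass segmentLabels out) := by unfold Spec_setClass; infer_instance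

-- ===== CLAIM (what is proved, stated in full; the proofs are below) =====
def Claim_equal_setClass : Prop := ∀ (segmentLabels : List (String × String)), Dom_setClass segmentLabels → Spec_setClass segmentLabels (setClass segmentLabels)

-- ===== LEMMAS AND PROOFS =====
theorem class_one_iff (s : String) : (getRhythmClass s = 1) ↔ isAfibNote s = true := by
  unfold getRhythmClass isAfibNote isNormalNote
  cases hN : PySem.Str.isIn "(N" s <;> cases hD : PySem.Str.isIn "(NOD" s <;>
    cases hA : PySem.Str.isIn "(AFIB" s <;> simp

theorem class_two_iff (s : String) : (getRhythmClass s = 2) ↔ isOtherNote s = true := by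
  unfold getRhythmClass isOtherNote isNormalNote
  cases hN : PySem.Str.isIn "(N" s <;> cases hD : PySem.Str.isIn "(NOD" s <;>
    cases hA : PySem.Str.isIn "(AFIB" s <;> simp

theorem loop_characterization (ls : List (String × String)) (b : Bool) :
    setClassLoop ls b =
      if (ls.map (fun lp => lp.1)).any isAfibNote then 1
      else if b || (ls.map (fun lp => lp.1)).any isOtherNote then 2
      else 0 := by
  induction ls generalizing b with
  | nil => cases b <;> rfl
  | cons h t ih =>
    simp only [setClassLoop, List.map_cons, List.any_cons]
    cases hA : isAfibNote h.1 with
    | true =>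
      have h1 := (class_one_iff h.1).mpr hA
      simp [h1]
    | false =>
      have h1 : getRhythmClass h.1 ≠ 1 := fun hc => by
        rw [(class_one_iff h.1).mp hc] at hA; exact Bool.noConfusion hA
      rw [if_neg h1, ih]
      have hbe : (getRhythmClass h.1 == 2) = isOtherNote h.1 := by
        cases hO : isOtherNote h.1 with
        | false =>
          have h2 : getRhythmClass h.1 ≠ 2 := fun hc => by
            rw [(class_two_iff h.1).mp hc] at hO; exact Bool.noConfusion hO
          simp [h2]
        | true => simp [(class_two_iff h.1).mpr hO]
      rw [hbe]
      rw [Bool.false_or, Bool.or_assoc]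
      rfl

-- ===== VERDICT (by name: the statement is the Claim_ definition above) =====
theorem setClass_spec : Claim_equal_setClass := by
  intro ls _
  unfold Spec_setClass setClass setClass_alt
  rw [loop_characterization]
  simp only [Bool.false_or]
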